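-- pv_equiv track=rewrite | github.com/JushBJJ/tt-metal | ttnn/core.py | _shape_is_broadcastable
-- ===== SOURCE A (Python) =====
-- def _shape_is_broadcastable(input_shape_a, input_shape_b):
--     *batch_shape_a, height_a, width_a = input_shape_a
--     *batch_shape_b, height_b, width_b = input_shape_b
--
--     # if width_a != height_b:
--     #     return False
--
--     len_diff = len(batch_shape_a) - len(batch_shape_b)
--     if len_diff > 0:
--         batch_shape_b = [1] * len_diff + batch_shape_b
--     else:
--         batch_shape_a = [1] * -len_diff + batch_shape_a
--
--     return all(x == y or (x == 1 and y != 1) or (x != 1 and y == 1) for x, y in zip(batch_shape_a, batch_shape_b))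
-- ===== SOURCE B (Python) =====
-- def _shape_is_broadcastable(input_shape_a, input_shape_b):
--     *batch_shape_a, height_a, width_a = input_shape_a
--     *batch_shape_b, height_b, width_b = input_shape_b
--
--     # Right-aligned scan from the last batch dim, missing dims count as 1;
--     # no padding lists are built, and we exit early on the first conflict.
--     i, j = len(batch_shape_a), len(batch_shape_b)
--     while i > 0 or j > 0:
--         x = batch_shape_a[i - 1] if i > 0 else 1
--         y = batch_shape_b[j - 1] if j > 0 else 1
--         if x != y and x != 1 and y != 1:
--             return False
--         if i > 0:
--             i -= 1
--         if j > 0: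
--             j -= 1
--     return True
-- ===== Notes on version B (the rewrite author's own statement) =====
-- stated objective: simpler
-- what changed: Replaces the length-difference computation plus 1-padding list construction plus zip/all over a three-clause predicate with a right-aligned two-index scan from the last batch dim that treats missing dims as 1 and exits early on the first conflict.
import Mathlib
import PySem

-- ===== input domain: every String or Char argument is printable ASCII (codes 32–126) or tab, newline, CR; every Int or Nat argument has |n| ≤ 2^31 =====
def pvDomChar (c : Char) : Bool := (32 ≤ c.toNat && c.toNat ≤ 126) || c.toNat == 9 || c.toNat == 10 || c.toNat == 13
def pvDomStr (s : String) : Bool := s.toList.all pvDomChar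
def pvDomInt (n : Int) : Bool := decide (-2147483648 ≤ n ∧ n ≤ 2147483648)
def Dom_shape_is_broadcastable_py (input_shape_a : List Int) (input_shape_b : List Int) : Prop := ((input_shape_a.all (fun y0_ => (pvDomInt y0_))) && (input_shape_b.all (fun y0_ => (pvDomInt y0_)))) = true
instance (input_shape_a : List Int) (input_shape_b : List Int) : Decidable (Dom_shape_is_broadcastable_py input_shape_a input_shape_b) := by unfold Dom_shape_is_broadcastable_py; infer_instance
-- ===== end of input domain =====

-- B does a right-aligned two-index scan with missing dims read as 1 (early exit), instead of
-- A's length-difference + 1-padding + zip/all; both raise ValueError on shapes of length < 2,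
-- which Pre_ excludes.

-- ===== PORT A =====
def shape_is_broadcastable_py (input_shape_a : List Int) (input_shape_b : List Int) : Bool :=
  -- *batch_shape, height, width = shape  ⇒  batch part = drop the last two elements
  let batch_a := input_shape_a.dropLast.dropLast
  let batch_b := input_shape_b.dropLast.dropLast
  let len_diff : Int := (batch_a.length : Int) - (batch_b.length : Int)
  let padded :=
    if len_diff > 0 then (batch_a, List.replicate len_diff.toNat (1 : Int) ++ batch_b)
    else (List.replicate (-len_diff).toNat (1 : Int) ++ batch_a, batch_b)
  (List.zip padded.1 padded.2).all
    (fun p => p.1 == p.2 || (p.1 == 1 && p.2 != 1) || (p.1 != 1 && p.2 == 1))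

-- ===== PORT B =====
-- the while-loop of Source B over the two reversed batch lists (indices i, j walking backwards)
def bRightScan : List Int → List Int → Bool
  | [], [] => true
  | x :: xs, [] =>
      if x != 1 && x != 1 && (1 : Int) != 1 then false else bRightScan xs []
  | [], y :: ys =>
      if (1 : Int) != y && (1 : Int) != 1 && y != 1 then false else bRightScan [] ys
  | x :: xs, y :: ys =>
      if x != y && x != 1 && y != 1 then false else bRightScan xs ys

def shape_is_broadcastable_py_alt (input_shape_a : List Int) (input_shape_b : List Int) : Bool :=
  bRightScan (input_shape_a.dropLast.dropLast).reverse (input_shape_b.dropLast.dropLast).reverse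

-- ===== PRECONDITION & SPEC =====
-- Pre_ excludes exactly the inputs where both A and B raise ValueError (unpacking needs ≥ 2 elements).
def Pre_shape_is_broadcastable_py (input_shape_a : List Int) (input_shape_b : List Int) : Prop :=
  2 ≤ input_shape_a.length ∧ 2 ≤ input_shape_b.length
instance (input_shape_a : List Int) (input_shape_b : List Int) : Decidable (Pre_shape_is_broadcastable_py input_shape_a input_shape_b) := by unfold Pre_shape_is_broadcastable_py; infer_instance
def pvWitness_shape_is_broadcastable_py : List Int × List Int := ([2, 1, 3, 4], [5, 2, 1, 3, 4])

def Spec_shape_is_broadcastable_py (input_shape_a : List Int) (input_shape_b : List Int) (out : Bool) : Prop := out = shape_is_broadcastable_py_alt input_shape_a input_shape_b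
instance (input_shape_a : List Int) (input_shape_b : List Int) (out : Bool) : Decidable (Spec_shape_is_broadcastable_py input_shape_a input_shape_b out) := by unfold Spec_shape_is_broadcastable_py; infer_instance

-- ===== CLAIM (what is proved, stated in full; the proofs are below) =====
def Claim_equal_shape_is_broadcastable_py : Prop := ∀ (input_shape_a : List Int) (input_shape_b : List Int), Dom_shape_is_broadcastable_py input_shape_a input_shape_b → Pre_shape_is_broadcastable_py input_shape_a input_shape_b → Spec_shape_is_broadcastable_py input_shape_a input_shape_b (shape_is_broadcastable_py input_shape_a input_shape_b)

-- ===== LEMMAS AND PROOFS =====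

-- A's three-clause predicate equals the negation of B's conflict test
theorem predA_eq (x y : Int) :
    (x == y || (x == 1 && y != 1) || (x != 1 && y == 1)) = !(x != y && x != 1 && y != 1) := by
  by_cases hx : x = 1 <;> by_cases hy : y = 1 <;> by_cases hxy : x = y <;>
    simp_all [bne, beq_eq_false_iff_ne.mpr]

-- ignoring a trailing block of 1s on the shorter side
theorem bRightScan_pad (u v : List Int) (h : v.length ≤ u.length) :
    bRightScan u v = bRightScan u (v ++ List.replicate (u.length - v.length) 1) := by
  induction u generalizing v with
  | nil =>
    have : v = [] := List.eq_nil_of_length_eq_zero (Nat.le_zero.mp h)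
    simp [this, bRightScan]
  | cons x xs ih =>
    cases v with
    | nil =>
      simp only [List.nil_append, List.length_cons, List.length_nil, Nat.sub_zero,
        List.replicate_succ, bRightScan]
      rw [ih [] (Nat.zero_le _)]
      simp
    | cons y ys =>
      simp only [List.cons_append, List.length_cons, bRightScan, Nat.succ_sub_succ]
      rw [ih ys (Nat.le_of_succ_le_succ h)]

-- the symmetric padding lemma for the first argument
theorem bRightScan_pad_left (u v : List Int) (h : u.length ≤ v.length) :
    bRightScan u v = bRightScan (u ++ List.replicate (v.length - u.length) 1) v := by
  induction v generalizing u with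
  | nil =>
    have : u = [] := List.eq_nil_of_length_eq_zero (Nat.le_zero.mp h)
    simp [this, bRightScan]
  | cons y ys ih =>
    cases u with
    | nil =>
      simp only [List.nil_append, List.length_cons, List.length_nil, Nat.sub_zero,
        List.replicate_succ, bRightScan]
      rw [ih [] (Nat.zero_le _)]
      simp
    | cons x xs =>
      simp only [List.cons_append, List.length_cons, bRightScan, Nat.succ_sub_succ]
      rw [ih xs (Nat.le_of_succ_le_succ h)]

-- on equal-length lists the scan is A's zip/all
theorem bRightScan_eq_zip_all (u v : List Int) (h : u.length = v.length) :
    bRightScan u v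
      = (List.zip u v).all (fun p => p.1 == p.2 || (p.1 == 1 && p.2 != 1) || (p.1 != 1 && p.2 == 1)) := by
  induction u generalizing v with
  | nil =>
    have : v = [] := List.eq_nil_of_length_eq_zero h.symm
    simp [this, bRightScan]
  | cons x xs ih =>
    cases v with
    | nil => simp at h
    | cons y ys =>
      simp only [List.zip_cons_cons, List.all_cons, bRightScan]
      rw [ih ys (by simpa using h), predA_eq]
      cases hb : (x != y && x != 1 && y != 1) <;> simp

-- reversing both sides of an equal-length zip/all changes nothing
theorem zip_all_reverse (u v : List Int) (h : u.length = v.length)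
    (p : Int × Int → Bool) :
    (List.zip u.reverse v.reverse).all p = (List.zip u v).all p := by
  rw [List.zip_eq_zipWith, List.zip_eq_zipWith, ← List.reverse_zipWith h, List.all_reverse]

theorem main_eq (a b : List Int) :
    shape_is_broadcastable_py a b = shape_is_broadcastable_py_alt a b := by
  unfold shape_is_broadcastable_py shape_is_broadcastable_py_alt
  set u := a.dropLast.dropLast with hu
  set v := b.dropLast.dropLast with hv
  by_cases hd : ((u.length : Int) - (v.length : Int)) > 0
  · have hle : v.length ≤ u.length := by omega
    have htn : ((u.length : Int) - (v.length : Int)).toNat = u.length - v.length := by omega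
    simp only [if_pos hd, htn]
    rw [bRightScan_pad u.reverse v.reverse (by simpa using hle)]
    have hrev : v.reverse ++ List.replicate (u.reverse.length - v.reverse.length) (1 : Int)
        = (List.replicate (u.length - v.length) (1 : Int) ++ v).reverse := by
      simp
    rw [hrev]
    have hlen : u.reverse.length
        = ((List.replicate (u.length - v.length) (1 : Int) ++ v).reverse).length := by
      simp; omega
    rw [bRightScan_eq_zip_all _ _ hlen]
    have hlen2 : u.length = (List.replicate (u.length - v.length) (1 : Int) ++ v).length := by
      simp; omega
    rw [zip_all_reverse _ _ hlen2]
  · have hle : u.length ≤ v.length := by omega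
    have htn : (-((u.length : Int) - (v.length : Int))).toNat = v.length - u.length := by omega
    simp only [if_neg hd, htn]
    rw [bRightScan_pad_left u.reverse v.reverse (by simpa using hle)]
    have hrev : u.reverse ++ List.replicate (v.reverse.length - u.reverse.length) (1 : Int)
        = (List.replicate (v.length - u.length) (1 : Int) ++ u).reverse := by
      simp
    rw [hrev]
    have hlen : ((List.replicate (v.length - u.length) (1 : Int) ++ u).reverse).length
        = v.reverse.length := by
      simp; omega
    rw [bRightScan_eq_zip_all _ _ hlen]
    have hlen2 : (List.replicate (v.length - u.length) (1 : Int) ++ u).length = v.length := by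
      simp; omega
    rw [zip_all_reverse _ _ hlen2]

-- ===== VERDICT (by name: the statement is the Claim_ definition above) =====
theorem shape_is_broadcastable_py_spec : Claim_equal_shape_is_broadcastable_py := by
  intro a b _ _
  unfold Spec_shape_is_broadcastable_py
  exact main_eq a b
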